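-- pv_equiv track=rewrite | github.com/Wh1teJ0ker/ZipFileCracker | zipCracker/core/main.py | get_nonswitch_arg
-- ===== SOURCE A (Python) =====
-- def get_nonswitch_arg(args: list[str]):
--     """
--     Extract commands and their arguments for later use.
--
--     提取命令及其参数，以供后续使用。
--     """
--     flag: bool = False
--     pure_args: list[str] = []
--
--     for arg in args:
--         if not arg.startswith('-') or flag:
--             flag = True
--             pure_args.append(arg)
--     return pure_args
-- ===== SOURCE B (Python) =====
-- def get_nonswitch_arg(args: list[str]):
--     """Return args from the first non-switch element onward (empty if none)."""
--     for i, arg in enumerate(args):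
--         if not arg.startswith('-'):
--             return args[i:]
--     return []
-- ===== Notes on version B (the rewrite author's own statement) =====
-- stated objective: simpler
-- what changed: Replaces the latching flag and element-by-element accumulator with a scan that finds the first non-switch index and returns a single slice, returning early.
import Mathlib
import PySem

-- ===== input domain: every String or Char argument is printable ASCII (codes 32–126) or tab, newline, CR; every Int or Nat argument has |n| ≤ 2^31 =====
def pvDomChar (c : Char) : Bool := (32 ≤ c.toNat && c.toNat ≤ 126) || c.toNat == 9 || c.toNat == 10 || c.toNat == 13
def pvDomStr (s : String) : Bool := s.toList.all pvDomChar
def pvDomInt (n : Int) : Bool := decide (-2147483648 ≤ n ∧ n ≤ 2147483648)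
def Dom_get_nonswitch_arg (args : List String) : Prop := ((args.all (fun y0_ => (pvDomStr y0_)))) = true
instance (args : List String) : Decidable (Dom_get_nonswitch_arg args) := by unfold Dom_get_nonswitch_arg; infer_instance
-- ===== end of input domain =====

-- B replaces A's latching flag + accumulator with find-first-non-switch index + one slice (objective: simpler).

-- ===== PORT A =====
-- A's loop over args carrying (flag, pure_args)
def gnsGoA (flag : Bool) (pure_args : List String) : List String → List String
  | [] => pure_args
  | a :: rest =>
    if ¬ PySem.Str.startswith a "-" || flag then gnsGoA true (pure_args ++ [a]) rest
    else gnsGoA flag pure_args rest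

def get_nonswitch_arg (args : List String) : List String := gnsGoA false [] args

-- ===== PORT B =====
-- index of the first arg not starting with '-' (B's enumerate scan)
def gnsFindIdx : List String → Option Nat
  | [] => none
  | a :: rest =>
    if ¬ PySem.Str.startswith a "-" then some 0
    else (gnsFindIdx rest).map (· + 1)

def get_nonswitch_arg_alt (args : List String) : List String :=
  match gnsFindIdx args with
  | some i => args.drop i          -- args[i:]
  | none => []

-- ===== PRECONDITION & SPEC =====
def Spec_get_nonswitch_arg (args : List String) (out : List String) : Prop := out = get_nonswitch_arg_alt args
instance (args : List String) (out : List String) : Decidable (Spec_get_nonswitch_arg args out) := by unfold Spec_get_nonswitch_arg; infer_instance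

-- ===== CLAIM (what is proved, stated in full; the proofs are below) =====
def Claim_equal_get_nonswitch_arg : Prop := ∀ (args : List String), Dom_get_nonswitch_arg args → Spec_get_nonswitch_arg args (get_nonswitch_arg args)

-- ===== LEMMAS AND PROOFS =====

-- once the flag is latched, A appends everything remaining
theorem gnsGoA_true (l : List String) : ∀ acc, gnsGoA true acc l = acc ++ l := by
  induction l with
  | nil => intro acc; simp [gnsGoA]
  | cons a rest ih => intro acc; simp [gnsGoA, ih]

theorem gnsMain (l : List String) : gnsGoA false [] l = get_nonswitch_arg_alt l := by
  induction l with
  | nil => simp [gnsGoA, get_nonswitch_arg_alt, gnsFindIdx]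
  | cons a rest ih =>
    cases h : PySem.Chars.startswith a.toList ['-'] with
    | false =>
      simp [gnsGoA, get_nonswitch_arg_alt, gnsFindIdx, PySem.Str.startswith, h, gnsGoA_true]
    | true =>
      simp only [gnsGoA, get_nonswitch_arg_alt, gnsFindIdx, PySem.Str.startswith, ih]
      cases gnsFindIdx rest <;>
        rw [if_neg (by simp [h]), if_neg (by simp [h])] <;> simp

-- ===== VERDICT (by name: the statement is the Claim_ definition above) =====
theorem get_nonswitch_arg_spec : Claim_equal_get_nonswitch_arg := by
  intro args _
  unfold Spec_get_nonswitch_arg get_nonswitch_arg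
  exact gnsMain args
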